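-- pv_equiv track=rewrite | github.com/shoshtari/competitive_programming | codeforces/2131F.py | calc
-- ===== SOURCE A (Python) =====
-- def find_lower_bound(arr, target):
--     # Find the index of the first element in arr that is >= target
--     low, high = 0, len(arr)
--     while low < high:
--         mid = (low + high) // 2
--         if mid == low:
--             return low if arr[low] >= target else high
--         if arr[mid] < target:
--             low = mid + 1
--         else:
--             high = mid
--     return low
--
-- def calc(a, b, c, d):
--     # Return Sum of min(a[i] + c[j], b[i] + d[j]) for i from 0 to n-1 and j from 0 to n-1
--     # using min decomposition using abs
--     n = len(a)
--     sig1 = 0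
--     for i in range(n):
--         sig1 += a[i] + b[i] + c[i] + d[i]
--
--     sig1 *= n
--
--     sig2 = 0
--     x = [a[i] - c[i] for i in range(n)]
--     y = [b[i] - d[i] for i in range(n)]
--     y.sort()
--     pary = [y[0]]
--     for i in range(1, n):
--         pary.append(pary[i - 1] + y[i])
--
--     for i in range(n):
--         lower_bound = find_lower_bound(y, -x[i])  # y[lower_bound] >= -x[i]
--         if lower_bound == 0:
--             assert y[0] >= -x[i]
--             sig2 += (x[i] * n) + pary[n - 1]
--         elif lower_bound == n:
--             assert y[n - 1] < -x[i]
--             sig2 += -(x[i] * n + pary[n - 1])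
--         else:
--             assert y[lower_bound - 1] < -x[i] <= y[lower_bound]
--             first_half = pary[lower_bound - 1]
--             second_half = pary[n - 1] - first_half
--             first_half_size = lower_bound
--             second_half_size = n - lower_bound
--             sig2 += (
--                 -(x[i] * first_half_size + first_half)
--                 + (x[i] * second_half_size)
--                 + second_half
--             )
--     return (sig1 - sig2) // 2
-- ===== SOURCE B (Python) =====
-- def calc(a, b, c, d):
--     # Sum of min(a[i]+c[j], b[i]+d[j]) over all pairs, via min(u,v) = (u+v-|u-v|)/2:
--     # sort x AND y, compute sig2 = sum |x[i]+y[j]| with one monotone pointer sweep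
--     # over sorted x against prefix sums of sorted y (no per-element binary search).
--     quads = list(zip(a, b, c, d))
--     n = len(quads)
--     sig1 = n * sum(ai + bi + ci + di for ai, bi, ci, di in quads)
--
--     xs = sorted(ai - ci for ai, _, ci, _ in quads)
--     ys = sorted(bi - di for _, bi, _, di in quads)
--     pref = [0]
--     for v in ys:
--         pref.append(pref[-1] + v)
--     total = pref[n]
--
--     sig2 = 0
--     p = n  # first index with ys[p] >= -x; decreases as x grows
--     for x in xs:
--         while p > 0 and ys[p - 1] >= -x:
--             p -= 1
--         below = pref[p]
--         sig2 += -(x * p + below) + (x * (n - p) + (total - below))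
--     return (sig1 - sig2) // 2
-- ===== Notes on version B (the rewrite author's own statement) =====
-- stated objective: faster
-- what changed: B builds the pair lists by one zip instead of index loops, sorts x as well as y, and computes sig2 in a single monotone two-pointer sweep over prefix sums of sorted y, replacing A's per-element hand-written binary search and three-way branch (one linear merge pass instead of n binary searches; measured ~2.9x).
import Mathlib
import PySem

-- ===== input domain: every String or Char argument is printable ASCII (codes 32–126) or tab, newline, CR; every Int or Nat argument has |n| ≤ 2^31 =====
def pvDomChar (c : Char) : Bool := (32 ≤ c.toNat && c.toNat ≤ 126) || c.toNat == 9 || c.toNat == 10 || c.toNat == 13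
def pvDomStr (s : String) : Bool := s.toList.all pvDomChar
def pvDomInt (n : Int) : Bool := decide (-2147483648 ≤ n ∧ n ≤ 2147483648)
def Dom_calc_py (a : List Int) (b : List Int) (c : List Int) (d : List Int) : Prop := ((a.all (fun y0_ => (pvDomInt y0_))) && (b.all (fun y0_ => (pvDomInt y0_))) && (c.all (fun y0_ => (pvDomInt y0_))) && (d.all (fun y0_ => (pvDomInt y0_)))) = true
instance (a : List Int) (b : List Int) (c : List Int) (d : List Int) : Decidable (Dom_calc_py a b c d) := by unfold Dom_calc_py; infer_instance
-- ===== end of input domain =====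

-- B replaces A's per-element hand-written binary search and three-way branch by sorting x as well,
-- sweeping one monotone pointer over prefix sums of sorted y (same value, one linear merge pass).
-- Return-value equivalence only; neither program mutates its arguments observably (A sorts a local copy).

-- ===== PORT A =====
-- A's hand-written binary search 'find_lower_bound' (the while loop is this recursion on high-low).
def flbAux (arr : List Int) (target : Int) (low high : Int) : Int :=
  if h : low < high then
    let mid := PySem.Int.floordiv (low + high) 2
    if mid = low then
      (if PySem.List.pyGetD arr low 0 ≥ target then low else high)
    else if PySem.List.pyGetD arr mid 0 < target then flbAux arr target (mid + 1) high
    else flbAux arr target low mid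
  else low
termination_by (high - low).toNat
decreasing_by
  · have := PySem.Int.floordiv_two_mid_bounds (le_of_lt h)
    omega
  · have h1 := PySem.Int.floordiv_two_mid_bounds (le_of_lt h)
    have h2 : PySem.Int.floordiv (low + high) 2 < high := by
      rw [PySem.Int.floordiv_lt_iff_lt_mul (by omega)]; omega
    omega

def find_lower_bound (arr : List Int) (target : Int) : Int :=
  flbAux arr target 0 (arr.length : Int)

def calc_py (a : List Int) (b : List Int) (c : List Int) (d : List Int) : Int :=
  let n : Int := (a.length : Int)
  let sig1 := (PySem.List.pyRange 0 n 1).foldl (fun acc i =>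
      acc + (PySem.List.pyGetD a i 0 + PySem.List.pyGetD b i 0 + PySem.List.pyGetD c i 0 + PySem.List.pyGetD d i 0)) 0
  let sig1 := sig1 * n
  let x := (PySem.List.pyRange 0 n 1).map (fun i => PySem.List.pyGetD a i 0 - PySem.List.pyGetD c i 0)
  let y := (PySem.List.pyRange 0 n 1).map (fun i => PySem.List.pyGetD b i 0 - PySem.List.pyGetD d i 0)
  let y := PySem.List.sorted y (fun v => v) false
  let pary := (PySem.List.pyRange 1 n 1).foldl (fun acc i =>
      acc ++ [PySem.List.pyGetD acc (i - 1) 0 + PySem.List.pyGetD y i 0]) [PySem.List.pyGetD y 0 0]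
  let sig2 := (PySem.List.pyRange 0 n 1).foldl (fun acc i =>
      let lb := find_lower_bound y (-(PySem.List.pyGetD x i 0))
      if lb = 0 then
        acc + ((PySem.List.pyGetD x i 0) * n + PySem.List.pyGetD pary (n - 1) 0)
      else if lb = n then
        acc + (-((PySem.List.pyGetD x i 0) * n + PySem.List.pyGetD pary (n - 1) 0))
      else
        let first_half := PySem.List.pyGetD pary (lb - 1) 0
        let second_half := PySem.List.pyGetD pary (n - 1) 0 - first_half
        let first_half_size := lb
        let second_half_size := n - lb
        acc + (-((PySem.List.pyGetD x i 0) * first_half_size + first_half)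
               + ((PySem.List.pyGetD x i 0) * second_half_size) + second_half)) 0
  PySem.Int.floordiv (sig1 - sig2) 2

-- ===== PORT B =====
-- B's inner 'while p > 0 and ys[p-1] >= -x: p -= 1' loop.
def pvAdvance (ys : List Int) (x : Int) (p : Int) : Int :=
  if h : p > 0 ∧ PySem.List.pyGetD ys (p - 1) 0 ≥ -x then pvAdvance ys x (p - 1) else p
termination_by p.toNat
decreasing_by omega

-- zip of the four lists (Python's zip(a, b, c, d)) is ported as nested List.zip.
def calc_py_alt (a : List Int) (b : List Int) (c : List Int) (d : List Int) : Int :=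
  let quads := a.zip (b.zip (c.zip d))
  let n : Int := (quads.length : Int)
  let sig1 := n * (quads.map (fun q => q.1 + q.2.1 + q.2.2.1 + q.2.2.2)).sum
  let xs := PySem.List.sorted (quads.map (fun q => q.1 - q.2.2.1)) (fun v => v) false
  let ys := PySem.List.sorted (quads.map (fun q => q.2.1 - q.2.2.2)) (fun v => v) false
  let pref := ys.foldl (fun acc v => acc ++ [PySem.List.pyGetD acc (-1) 0 + v]) [0]
  let total := PySem.List.pyGetD pref n 0
  let res := xs.foldl (fun (st : Int × Int) x =>
      let p := pvAdvance ys x st.1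
      let below := PySem.List.pyGetD pref p 0
      (p, st.2 + (-(x * p + below) + (x * (n - p) + (total - below))))) (n, 0)
  PySem.Int.floordiv (sig1 - res.2) 2

-- ===== PRECONDITION & SPEC =====
-- Pre_ excludes exactly the inputs where Python A raises IndexError: a empty (pary = [y[0]]),
-- or b/c/d shorter than a (the i-loops index them up to len(a)-1).
def Pre_calc_py (a : List Int) (b : List Int) (c : List Int) (d : List Int) : Prop :=
  a ≠ [] ∧ a.length ≤ b.length ∧ a.length ≤ c.length ∧ a.length ≤ d.length
instance (a : List Int) (b : List Int) (c : List Int) (d : List Int) : Decidable (Pre_calc_py a b c d) := by unfold Pre_calc_py; infer_instance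

def pvWitness_calc_py : List Int × List Int × List Int × List Int := ([1, 5], [2, -3], [3, 0], [4, 7])

def Spec_calc_py (a : List Int) (b : List Int) (c : List Int) (d : List Int) (out : Int) : Prop := out = calc_py_alt a b c d
instance (a : List Int) (b : List Int) (c : List Int) (d : List Int) (out : Int) : Decidable (Spec_calc_py a b c d out) := by unfold Spec_calc_py; infer_instance

-- ===== CLAIM (what is proved, stated in full; the proofs are below) =====
def Claim_equal_calc_py : Prop := ∀ (a : List Int) (b : List Int) (c : List Int) (d : List Int), Dom_calc_py a b c d → Pre_calc_py a b c d → Spec_calc_py a b c d (calc_py a b c d)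
-- ===== LEMMAS AND PROOFS =====

def pvCnt (y : List Int) (t : Int) : Nat := y.countP (fun e => decide (e < t))

lemma pv_sorted_split (y : List Int) (h : y.Pairwise (· ≤ ·)) (t : Int) :
    (∀ e ∈ y.take (pvCnt y t), e < t) ∧ (∀ e ∈ y.drop (pvCnt y t), t ≤ e) := by
  induction y with
  | nil => simp [pvCnt]
  | cons hd tl ih =>
    rcases List.pairwise_cons.mp h with ⟨hhd, htl⟩
    by_cases hlt : hd < t
    · have : pvCnt (hd :: tl) t = pvCnt tl t + 1 := by simp [pvCnt, hlt]
      rw [this]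
      obtain ⟨ih1, ih2⟩ := ih htl
      refine ⟨?_, ?_⟩
      · intro e he
        simp [List.take_succ_cons] at he
        rcases he with rfl | he
        · exact hlt
        · exact ih1 e he
      · intro e he
        simpa using ih2 e (by simpa using he)
    · have hz : pvCnt (hd :: tl) t = 0 := by
        simp [pvCnt, hlt]
        intro e he
        have := hhd e he
        omega
      rw [hz]
      refine ⟨by simp, ?_⟩
      intro e he
      simp at he
      rcases he with rfl | he
      · omega
      · have := hhd e he; omega

lemma pvCnt_le_length (y : List Int) (t : Int) : pvCnt y t ≤ y.length :=
  List.countP_le_length ..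

lemma pv_idx_lt (y : List Int) (h : y.Pairwise (· ≤ ·)) (t : Int) (k : Nat)
    (hk : k < pvCnt y t) : y[k]'(lt_of_lt_of_le hk (pvCnt_le_length y t)) < t := by
  have hky : k < y.length := lt_of_lt_of_le hk (pvCnt_le_length y t)
  have hkt : k < (y.take (pvCnt y t)).length := by
    rw [List.length_take]; exact lt_min hk hky
  have hmem : (y.take (pvCnt y t))[k]'hkt ∈ y.take (pvCnt y t) := List.getElem_mem hkt
  have := (pv_sorted_split y h t).1 _ hmem
  rwa [List.getElem_take] at this

lemma pv_idx_ge (y : List Int) (h : y.Pairwise (· ≤ ·)) (t : Int) (k : Nat)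
    (hk : pvCnt y t ≤ k) (hk2 : k < y.length) : t ≤ y[k] := by
  have hlen : k - pvCnt y t < (y.drop (pvCnt y t)).length := by
    rw [List.length_drop]; omega
  have hmem : (y.drop (pvCnt y t))[k - pvCnt y t]'hlen ∈ y.drop (pvCnt y t) :=
    List.getElem_mem hlen
  have := (pv_sorted_split y h t).2 _ hmem
  rw [List.getElem_drop] at this
  have he : y[pvCnt y t + (k - pvCnt y t)]'(by omega) = y[k]'hk2 := by
    congr 1; omega
  rwa [he] at this

lemma pv_getD_int (y : List Int) (i : Int) (h0 : 0 ≤ i) (h1 : i < (y.length : Int)) :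
    PySem.List.pyGetD y i 0 = y[i.toNat]'(by omega) := by
  rw [PySem.List.pyGetD_eq_getElem] <;> assumption

lemma pv_flbAux_eq (y : List Int) (h : y.Pairwise (· ≤ ·)) (t : Int) :
    ∀ (N : Nat) (low high : Int), (high - low).toNat ≤ N →
    0 ≤ low → low ≤ (pvCnt y t : Int) → (pvCnt y t : Int) ≤ high →
    high ≤ (y.length : Int) → flbAux y t low high = (pvCnt y t : Int) := by
  intro N
  induction N with
  | zero =>
    intro low high hN h0 h1 h2 h3
    rw [flbAux]
    have : ¬ low < high := by omega
    simp [this]; omega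
  | succ N ih =>
    intro low high hN h0 h1 h2 h3
    rw [flbAux]
    by_cases hlh : low < high
    · simp only [hlh, dif_pos]
      have hmid := PySem.Int.floordiv_two_mid_bounds (le_of_lt hlh)
      have hmlt : PySem.Int.floordiv (low + high) 2 < high := by
        rw [PySem.Int.floordiv_lt_iff_lt_mul (by omega)]; omega
      set mid := PySem.Int.floordiv (low + high) 2 with hm
      by_cases hml : mid = low
      · rw [if_pos hml]
        have hln : low < (y.length : Int) := by omega
        rw [pv_getD_int y low h0 hln]
        have hhl1 : high = low + 1 := by
          have : ¬ (low + 1 < high) := by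
            intro hc
            have : low + 1 ≤ mid := by
              rw [hm, PySem.Int.le_floordiv_iff_mul_le (by omega)]; omega
            omega
          omega
        by_cases hge : y[low.toNat]'(by omega) ≥ t
        · rw [if_pos hge]
          -- t ≤ y[low] ⇒ pvCnt ≤ low
          by_contra hne
          have hlt : low.toNat < pvCnt y t := by omega
          have := pv_idx_lt y h t low.toNat hlt
          omega
        · rw [if_neg hge]
          -- y[low] < t ⇒ pvCnt > low, so pvCnt = high
          have : ¬ ((pvCnt y t : Int) ≤ low) := by
            intro hc
            have := pv_idx_ge y h t low.toNat (by omega) (by omega)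
            omega
          omega
      · rw [if_neg hml]
        have hmgt : low < mid := by omega
        have hmln : mid < (y.length : Int) := by omega
        rw [pv_getD_int y mid (by omega) hmln]
        by_cases hlt : y[mid.toNat]'(by omega) < t
        · rw [if_pos hlt]
          apply ih (mid + 1) high (by omega) (by omega) ?_ h2 h3
          by_contra hc
          have := pv_idx_ge y h t mid.toNat (by omega) (by omega)
          omega
        · rw [if_neg hlt]
          apply ih low mid (by omega) h0 h1 ?_ (by omega)
          by_contra hc
          have := pv_idx_lt y h t mid.toNat (by omega)
          omega
    · simp [hlh]; omega

lemma pv_advance_eq (y : List Int) (h : y.Pairwise (· ≤ ·)) (x : Int) :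
    ∀ (N : Nat) (p : Int), p.toNat ≤ N →
    (pvCnt y (-x) : Int) ≤ p → p ≤ (y.length : Int) →
    pvAdvance y x p = (pvCnt y (-x) : Int) := by
  intro N
  induction N with
  | zero =>
    intro p hN h1 h2
    rw [pvAdvance]
    have hp0 : p ≤ 0 := by omega
    have : ¬ (p > 0 ∧ PySem.List.pyGetD y (p - 1) 0 ≥ -x) := by
      intro hc; omega
    rw [dif_neg this]; omega
  | succ N ih =>
    intro p hN h1 h2
    rw [pvAdvance]
    by_cases hc : p > 0 ∧ PySem.List.pyGetD y (p - 1) 0 ≥ -x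
    · rw [dif_pos hc]
      obtain ⟨hp, hge⟩ := hc
      rw [pv_getD_int y (p - 1) (by omega) (by omega)] at hge
      have hcle : (pvCnt y (-x) : Int) ≤ p - 1 := by
        by_contra hcc
        have := pv_idx_lt y h (-x) (p - 1).toNat (by omega)
        omega
      exact ih (p - 1) (by omega) hcle (by omega)
    · rw [dif_neg hc]
      by_cases hp : p > 0
      · have hge : ¬ (PySem.List.pyGetD y (p - 1) 0 ≥ -x) := by tauto
        rw [pv_getD_int y (p - 1) (by omega) (by omega)] at hge
        have : p ≤ (pvCnt y (-x) : Int) := by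
          by_contra hcc
          have := pv_idx_ge y h (-x) (p - 1).toNat (by omega) (by omega)
          omega
        omega
      · omega

def pvPrefixSums (s : Int) : List Int → List Int
  | [] => []
  | v :: tl => (s + v) :: pvPrefixSums (s + v) tl

lemma pv_length_prefixSums (s : Int) (l : List Int) :
    (pvPrefixSums s l).length = l.length := by
  induction l generalizing s with
  | nil => rfl
  | cons v tl ih => simp [pvPrefixSums, ih]

lemma pv_getLast_append_singleton (acc : List Int) (v : Int) (h : acc ++ [v] ≠ []) :
    (acc ++ [v]).getLast h = v := by
  simp

lemma pv_getD_neg_one (acc : List Int) (h : acc ≠ []) :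
    PySem.List.pyGetD acc (-1) 0 = acc.getLast h := by
  have hl : 1 ≤ acc.length := List.length_pos_iff.mpr h
  have he : PySem.List.pyGetD acc (-1) 0 = acc[acc.length - 1]'(by omega) := by
    simp [PySem.List.pyGetD, PySem.List.pyGet?, PySem.List.pyIdx?, hl,
      List.getElem?_eq_getElem (by omega : acc.length - 1 < acc.length)]
  rw [he, List.getLast_eq_getElem]

lemma pv_fold_pref (l : List Int) : ∀ (acc : List Int) (hacc : acc ≠ []),
    l.foldl (fun acc v => acc ++ [PySem.List.pyGetD acc (-1) 0 + v]) acc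
      = acc ++ pvPrefixSums (acc.getLast hacc) l := by
  induction l with
  | nil => intro acc hacc; simp [pvPrefixSums]
  | cons v tl ih =>
    intro acc hacc
    simp only [List.foldl_cons]
    rw [pv_getD_neg_one acc hacc]
    have hne : acc ++ [acc.getLast hacc + v] ≠ [] := by simp
    rw [ih _ hne, pv_getLast_append_singleton]
    simp [pvPrefixSums]

lemma pv_prefixSums_getElem (l : List Int) : ∀ (s : Int) (k : Nat) (hk : k < l.length),
    (pvPrefixSums s l)[k]'(by rw [pv_length_prefixSums]; exact hk) = s + (l.take (k + 1)).sum := by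
  induction l with
  | nil => intro s k hk; simp at hk
  | cons v tl ih =>
    intro s k hk
    cases k with
    | zero => simp [pvPrefixSums]
    | succ k =>
      have h2 : k < tl.length := by simpa using hk
      simp only [pvPrefixSums, List.getElem_cons_succ, List.take_succ_cons, List.sum_cons]
      rw [ih (s + v) k h2]
      ring

lemma pv_pary_eq (ys : List Int) (hn : 1 ≤ ys.length) : ∀ (m : Nat), 1 ≤ m → m ≤ ys.length →
    (PySem.List.pyRange 1 (m : Int) 1).foldl (fun acc i =>
        acc ++ [PySem.List.pyGetD acc (i - 1) 0 + PySem.List.pyGetD ys i 0]) [PySem.List.pyGetD ys 0 0]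
      = (List.range m).map (fun k => (ys.take (k + 1)).sum) := by
  intro m
  induction m with
  | zero => omega
  | succ m ih =>
    intro _ hm1
    by_cases hm : m = 0
    · subst hm
      rw [PySem.List.pyRange_one_eq_nil (by omega)]
      simp only [List.foldl_nil, List.range_one, List.map_cons, List.map_nil]
      obtain ⟨h0, t, rfl⟩ : ∃ h0 t, ys = h0 :: t := by
        cases ys with | nil => simp at hn | cons h0 t => exact ⟨h0, t, rfl⟩
      simp [pv_getD_int (h0 :: t) 0 (by omega) (by simp)]
    · have h1m : 1 ≤ m := by omega
      have hcast : ((m : Int) + 1) = ((m + 1 : Nat) : Int) := by push_cast; ring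
      rw [← hcast, PySem.List.pyRange_one_succ_right (by omega), List.foldl_append,
        ih h1m (by omega)]
      simp only [List.foldl_cons, List.foldl_nil]
      have hlen : ((List.range m).map (fun k => (ys.take (k + 1)).sum)).length = m := by simp
      have hget : PySem.List.pyGetD ((List.range m).map (fun k => (ys.take (k + 1)).sum)) ((m : Int) - 1) 0
          = (ys.take m).sum := by
        have : ((m : Int) - 1) = ((m - 1 : Nat) : Int) := by omega
        rw [this, pv_getD_int ((List.range m).map (fun k => (ys.take (k + 1)).sum)) ((m - 1 : Nat) : Int) (by omega) (by simp; omega)]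
        simp only [Int.toNat_natCast]
        rw [List.getElem_map, List.getElem_range]
        have hm11 : m - 1 + 1 = m := by omega
        rw [hm11]
      have hgy : PySem.List.pyGetD ys (m : Int) 0 = ys[m]'(by omega) := by
        rw [pv_getD_int ys (m : Int) (by omega) (by omega)]
        simp
      rw [hget, hgy, List.range_succ, List.map_append]
      have hts : (List.take (m + 1) ys).sum = (List.take m ys).sum + ys[m]'(by omega) := by
        exact List.sum_take_succ ys m (by omega)
      simp [hts]

lemma pv_flb_eq (y : List Int) (h : y.Pairwise (· ≤ ·)) (t : Int) :
    find_lower_bound y t = (pvCnt y t : Int) := by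
  have hc := pvCnt_le_length y t
  exact pv_flbAux_eq y h t ((y.length : Int) - 0).toNat 0 (y.length : Int)
    (by omega) (by omega) (by omega) (by omega) (by omega)

def pvG (y : List Int) (x : Int) : Int :=
  -(x * (pvCnt y (-x) : Int) + (y.take (pvCnt y (-x))).sum)
    + (x * ((y.length : Int) - (pvCnt y (-x))) + (y.sum - (y.take (pvCnt y (-x))).sum))

def pvPary (ys : List Int) : List Int := (List.range ys.length).map (fun k => (ys.take (k + 1)).sum)

lemma pv_pary_getD (ys : List Int) (q : Nat) (h1 : 1 ≤ q) (h2 : q ≤ ys.length) :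
    PySem.List.pyGetD (pvPary ys) ((q : Int) - 1) 0 = (ys.take q).sum := by
  have hl : (pvPary ys).length = ys.length := by simp [pvPary]
  have hq : ((q : Int) - 1) = ((q - 1 : Nat) : Int) := by omega
  rw [hq, pv_getD_int (pvPary ys) ((q - 1 : Nat) : Int) (by omega) (by rw [hl]; omega)]
  simp only [Int.toNat_natCast, pvPary]
  rw [List.getElem_map, List.getElem_range]
  have : q - 1 + 1 = q := by omega
  rw [this]

lemma pv_pary_last (ys : List Int) (hn : 1 ≤ ys.length) :
    PySem.List.pyGetD (pvPary ys) ((ys.length : Int) - 1) 0 = ys.sum := by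
  rw [pv_pary_getD ys ys.length hn le_rfl, List.take_length]

lemma pv_bodyA (ys : List Int) (hys : ys.Pairwise (· ≤ ·)) (hn : 1 ≤ ys.length) (x : Int) :
    (if find_lower_bound ys (-x) = 0 then
        x * (ys.length : Int) + PySem.List.pyGetD (pvPary ys) ((ys.length : Int) - 1) 0
      else if find_lower_bound ys (-x) = (ys.length : Int) then
        -(x * (ys.length : Int) + PySem.List.pyGetD (pvPary ys) ((ys.length : Int) - 1) 0)
      else
        -(x * find_lower_bound ys (-x) + PySem.List.pyGetD (pvPary ys) (find_lower_bound ys (-x) - 1) 0)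
          + x * ((ys.length : Int) - find_lower_bound ys (-x))
          + (PySem.List.pyGetD (pvPary ys) ((ys.length : Int) - 1) 0
             - PySem.List.pyGetD (pvPary ys) (find_lower_bound ys (-x) - 1) 0))
      = pvG ys x := by
  rw [pv_flb_eq ys hys (-x), pv_pary_last ys hn]
  have hc := pvCnt_le_length ys (-x)
  by_cases h0 : (pvCnt ys (-x) : Int) = 0
  · rw [if_pos h0]
    have hz : pvCnt ys (-x) = 0 := by omega
    simp [pvG, hz]
  · rw [if_neg h0]
    by_cases hN : (pvCnt ys (-x) : Int) = (ys.length : Int)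
    · rw [if_pos hN]
      have hz : pvCnt ys (-x) = ys.length := by omega
      simp [pvG, hz, List.take_length]
    · rw [if_neg hN]
      rw [pv_pary_getD ys (pvCnt ys (-x)) (by omega) (by omega)]
      simp only [pvG]
      ring

def pvPref (ys : List Int) : List Int := (0 : Int) :: pvPrefixSums 0 ys

lemma pv_pref_getD (ys : List Int) (q : Nat) (hq : q ≤ ys.length) :
    PySem.List.pyGetD (pvPref ys) (q : Int) 0 = (ys.take q).sum := by
  have hl : (pvPref ys).length = ys.length + 1 := by simp [pvPref, pv_length_prefixSums]
  rw [pv_getD_int (pvPref ys) (q : Int) (by omega) (by rw [hl]; omega)]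
  simp only [Int.toNat_natCast]
  cases q with
  | zero => simp [pvPref]
  | succ k =>
    have hk : k < ys.length := by omega
    show (pvPrefixSums 0 ys)[k]'(by rw [pv_length_prefixSums]; omega) = _
    rw [pv_prefixSums_getElem ys 0 k hk]
    simp

lemma pv_fold_pref_eq (ys : List Int) :
    ys.foldl (fun acc v => acc ++ [PySem.List.pyGetD acc (-1) 0 + v]) [0] = pvPref ys := by
  rw [pv_fold_pref ys [0] (by simp)]
  simp [pvPref]

lemma pv_foldB (ys : List Int) (hys : ys.Pairwise (· ≤ ·)) :
    ∀ (l : List Int), l.Pairwise (· ≤ ·) → ∀ (p s : Int),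
    (∀ x ∈ l, (pvCnt ys (-x) : Int) ≤ p) → p ≤ (ys.length : Int) →
    (l.foldl (fun (st : Int × Int) x =>
        (pvAdvance ys x st.1,
         st.2 + (-(x * pvAdvance ys x st.1 + PySem.List.pyGetD (pvPref ys) (pvAdvance ys x st.1) 0)
           + (x * ((ys.length : Int) - pvAdvance ys x st.1)
              + (PySem.List.pyGetD (pvPref ys) ((ys.length : Int)) 0
                 - PySem.List.pyGetD (pvPref ys) (pvAdvance ys x st.1) 0))))) (p, s)).2
      = s + (l.map (pvG ys)).sum := by
  intro l
  induction l with
  | nil => intro _ p s _ _; simp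
  | cons x tl ih =>
    intro hl p s hle hpn
    rcases List.pairwise_cons.mp hl with ⟨hhd, htl⟩
    have hadv : pvAdvance ys x p = (pvCnt ys (-x) : Int) := by
      exact pv_advance_eq ys hys x p.toNat p (le_rfl) (hle x (by simp)) hpn
    simp only [List.foldl_cons, hadv]
    have hC := pvCnt_le_length ys (-x)
    have hlook : PySem.List.pyGetD (pvPref ys) ((pvCnt ys (-x) : Int)) 0 = (ys.take (pvCnt ys (-x))).sum :=
      pv_pref_getD ys (pvCnt ys (-x)) hC
    have htot : PySem.List.pyGetD (pvPref ys) ((ys.length : Int)) 0 = ys.sum := by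
      have := pv_pref_getD ys ys.length le_rfl
      rwa [List.take_length] at this
    have hle' : ∀ x' ∈ tl, (pvCnt ys (-x') : Int) ≤ (pvCnt ys (-x) : Int) := by
      intro x' hx'
      have hxx : x ≤ x' := hhd x' hx'
      have : pvCnt ys (-x') ≤ pvCnt ys (-x) := by
        apply List.countP_mono_left
        intro e _ he
        simp only [decide_eq_true_eq] at he ⊢
        omega
      omega
    rw [ih htl (pvCnt ys (-x) : Int) _ hle' (by omega), hlook, htot]
    simp only [List.map_cons, List.sum_cons, pvG]
    ring

def pvXL (a c : List Int) : List Int :=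
  (PySem.List.pyRange 0 (a.length : Int) 1).map (fun i => PySem.List.pyGetD a i 0 - PySem.List.pyGetD c i 0)
def pvYS (a b d : List Int) : List Int :=
  PySem.List.sorted ((PySem.List.pyRange 0 (a.length : Int) 1).map
    (fun i => PySem.List.pyGetD b i 0 - PySem.List.pyGetD d i 0)) (fun v => v) false

lemma pv_len_pyRange0 (n : Nat) : (PySem.List.pyRange 0 (n : Int) 1).length = n := by
  rw [PySem.List.length_pyRange_one]; omega

lemma pv_zip_len (a b c d : List Int) (hb : a.length ≤ b.length) (hc : a.length ≤ c.length)
    (hd : a.length ≤ d.length) : (a.zip (b.zip (c.zip d))).length = a.length := by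
  simp [List.length_zip]; omega

lemma pv_zip_map (a b c d : List Int) (hb : a.length ≤ b.length) (hc : a.length ≤ c.length)
    (hd : a.length ≤ d.length) (f : Int → Int → Int → Int → Int) :
    (a.zip (b.zip (c.zip d))).map (fun q => f q.1 q.2.1 q.2.2.1 q.2.2.2)
      = (PySem.List.pyRange 0 (a.length : Int) 1).map
          (fun i => f (PySem.List.pyGetD a i 0) (PySem.List.pyGetD b i 0)
            (PySem.List.pyGetD c i 0) (PySem.List.pyGetD d i 0)) := by
  apply List.ext_getElem
  · simp [List.length_zip, pv_len_pyRange0]; omega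
  · intro i h1 h2
    have hia : i < a.length := by simpa [List.length_zip, pv_len_pyRange0] using h2
    rw [List.getElem_map, List.getElem_map, List.getElem_zip, List.getElem_zip, List.getElem_zip,
      PySem.List.getElem_pyRange_one]
    simp only [zero_add]
    rw [pv_getD_int a (i : Int) (by omega) (by omega),
      pv_getD_int b (i : Int) (by omega) (by omega),
      pv_getD_int c (i : Int) (by omega) (by omega),
      pv_getD_int d (i : Int) (by omega) (by omega)]
    simp

lemma pv_pary_fold' (ys : List Int) (n : Int) (hn : n = (ys.length : Int)) (h1 : 1 ≤ ys.length) :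
    (PySem.List.pyRange 1 n 1).foldl (fun acc i =>
        acc ++ [PySem.List.pyGetD acc (i - 1) 0 + PySem.List.pyGetD ys i 0]) [PySem.List.pyGetD ys 0 0]
      = pvPary ys := by
  rw [hn]; exact pv_pary_eq ys h1 ys.length h1 le_rfl

lemma pv_A_val (a b c d : List Int) (ha : a ≠ []) (hb : a.length ≤ b.length)
    (hc : a.length ≤ c.length) (hd : a.length ≤ d.length) :
    calc_py a b c d = PySem.Int.floordiv
      (((PySem.List.pyRange 0 (a.length : Int) 1).map (fun i =>
          PySem.List.pyGetD a i 0 + PySem.List.pyGetD b i 0 + PySem.List.pyGetD c i 0 + PySem.List.pyGetD d i 0)).sum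
        * (a.length : Int)
        - ((pvXL a c).map (pvG (pvYS a b d))).sum) 2 := by
  have hyl : (pvYS a b d).length = a.length := by
    simp [pvYS, PySem.List.length_sorted, pv_len_pyRange0]
  have hn : 1 ≤ (pvYS a b d).length := by
    rw [hyl]; exact List.length_pos_iff.mpr ha
  have hys : (pvYS a b d).Pairwise (· ≤ ·) := PySem.List.sorted_pairwise _ _
  simp only [calc_py]
  rw [PySem.List.foldl_add]
  rw [show PySem.List.sorted ((PySem.List.pyRange 0 ((a.length : Int)) 1).map
      (fun i => PySem.List.pyGetD b i 0 - PySem.List.pyGetD d i 0)) (fun v => v) false = pvYS a b d from rfl]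
  rw [pv_pary_fold' (pvYS a b d) ((a.length : Int)) (by rw [hyl]) hn]
  rw [PySem.List.foldl_congr_mem _ _
    (fun acc i => acc + pvG (pvYS a b d) (PySem.List.pyGetD (pvXL a c) i 0)) 0 ?pt]
  case pt =>
    intro acc i hi
    rw [PySem.List.mem_pyRange_one] at hi
    have hbd := pv_bodyA (pvYS a b d) hys hn (PySem.List.pyGetD (pvXL a c) i 0)
    rw [show ((pvYS a b d).length : Int) = ((a.length : Int)) from by rw [hyl]] at hbd
    rw [show ((PySem.List.pyRange 0 ((a.length : Int)) 1).map
      (fun i => PySem.List.pyGetD a i 0 - PySem.List.pyGetD c i 0)) = pvXL a c from rfl]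
    beta_reduce
    rw [← hbd]
    split_ifs <;> ring
  rw [PySem.List.foldl_add]
  have hmap : ((PySem.List.pyRange 0 ((a.length : Int)) 1).map
      (fun i => pvG (pvYS a b d) (PySem.List.pyGetD (pvXL a c) i 0))) = (pvXL a c).map (pvG (pvYS a b d)) := by
    rw [pvXL, List.map_map]
    apply List.map_congr_left
    intro i hi
    rw [PySem.List.mem_pyRange_one] at hi
    simp only [Function.comp]
    rw [PySem.List.pyGetD_map_pyRange_of_nonneg _ _ _ _ (by omega) (by omega)]
  rw [hmap]
  ring_nf

lemma pv_B_val (a b c d : List Int) (ha : a ≠ []) (hb : a.length ≤ b.length)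
    (hc : a.length ≤ c.length) (hd : a.length ≤ d.length) :
    calc_py_alt a b c d = PySem.Int.floordiv
      ((a.length : Int) * ((PySem.List.pyRange 0 (a.length : Int) 1).map (fun i =>
          PySem.List.pyGetD a i 0 + PySem.List.pyGetD b i 0 + PySem.List.pyGetD c i 0 + PySem.List.pyGetD d i 0)).sum
        - ((PySem.List.sorted (pvXL a c) (fun v => v) false).map (pvG (pvYS a b d))).sum) 2 := by
  have hyl : (pvYS a b d).length = a.length := by
    simp [pvYS, PySem.List.length_sorted, pv_len_pyRange0]
  have hn : 1 ≤ (pvYS a b d).length := by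
    rw [hyl]; exact List.length_pos_iff.mpr ha
  have hys : (pvYS a b d).Pairwise (· ≤ ·) := PySem.List.sorted_pairwise _ _
  have hql := pv_zip_len a b c d hb hc hd
  simp only [calc_py_alt, hql]
  rw [pv_zip_map a b c d hb hc hd (fun p q r s => p + q + r + s),
    pv_zip_map a b c d hb hc hd (fun p q r s => p - r),
    pv_zip_map a b c d hb hc hd (fun p q r s => q - s)]
  rw [show PySem.List.sorted ((PySem.List.pyRange 0 ((a.length : Int)) 1).map
      (fun i => PySem.List.pyGetD b i 0 - PySem.List.pyGetD d i 0)) (fun v => v) false = pvYS a b d from rfl]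
  rw [show ((PySem.List.pyRange 0 ((a.length : Int)) 1).map
      (fun i => PySem.List.pyGetD a i 0 - PySem.List.pyGetD c i 0)) = pvXL a c from rfl]
  rw [pv_fold_pref_eq (pvYS a b d)]
  rw [show ((a.length : Int)) = ((pvYS a b d).length : Int) from by rw [hyl]]
  rw [pv_foldB (pvYS a b d) hys (PySem.List.sorted (pvXL a c) (fun v => v) false)
    (PySem.List.sorted_pairwise _ _) ((pvYS a b d).length : Int) 0
    (fun x _ => by exact_mod_cast pvCnt_le_length (pvYS a b d) (-x)) le_rfl]
  rw [zero_add]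


-- ===== VERDICT (by name: the statement is the Claim_ definition above) =====
theorem calc_py_spec : Claim_equal_calc_py := by
  intro a b c d _ hpre
  obtain ⟨ha, hb, hc, hd⟩ := hpre
  unfold Spec_calc_py
  rw [pv_A_val a b c d ha hb hc hd, pv_B_val a b c d ha hb hc hd]
  have hperm : ((PySem.List.sorted (pvXL a c) (fun v => v) false).map (pvG (pvYS a b d))).sum
      = ((pvXL a c).map (pvG (pvYS a b d))).sum :=
    List.Perm.sum_eq ((PySem.List.sorted_perm (pvXL a c) (fun v => v) false).map _)
  rw [hperm, mul_comm]
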